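-- pv_equiv track=rewrite | github.com/Royeqiu/Sentence_generator | sentence_generator.py | set_next_word_dict
-- ===== SOURCE A (Python) =====
-- def set_next_word_dict(stories):
--     next_word_dict=dict()
--     for story in stories:
--         for i,word in enumerate(story):
--             if i==len(story)-1:
--                 break
--             if word not in next_word_dict.keys():
--                 next_word_list=[]
--                 next_word_list.append(story[i+1])
--                 next_word_dict[word]=next_word_list
--             else:
--                 if story[i+1] not in next_word_dict[word]:
--                     next_word_dict[word].append(story[i+1])
--     return next_word_dict
-- ===== SOURCE B (Python) =====
-- def set_next_word_dict(stories):
--     # Pass 1: collect every follower (duplicates kept, no membership tests).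
--     follow = {}
--     for story in stories:
--         for w, n in zip(story, story[1:]):
--             follow.setdefault(w, []).append(n)
--     # Pass 2: dedup each follower list, keeping first-seen order.
--     return {w: list(dict.fromkeys(ns)) for w, ns in follow.items()}
-- ===== Notes on version B (the rewrite author's own statement) =====
-- stated objective: alternative
-- what changed: A interleaves a linear membership test into one scan ('append only if not already in the list'); B first collects all followers with duplicates in one pair-zip pass with no membership tests, then dedups each list in a separate second pass via dict.fromkeys.
import Mathlib
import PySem

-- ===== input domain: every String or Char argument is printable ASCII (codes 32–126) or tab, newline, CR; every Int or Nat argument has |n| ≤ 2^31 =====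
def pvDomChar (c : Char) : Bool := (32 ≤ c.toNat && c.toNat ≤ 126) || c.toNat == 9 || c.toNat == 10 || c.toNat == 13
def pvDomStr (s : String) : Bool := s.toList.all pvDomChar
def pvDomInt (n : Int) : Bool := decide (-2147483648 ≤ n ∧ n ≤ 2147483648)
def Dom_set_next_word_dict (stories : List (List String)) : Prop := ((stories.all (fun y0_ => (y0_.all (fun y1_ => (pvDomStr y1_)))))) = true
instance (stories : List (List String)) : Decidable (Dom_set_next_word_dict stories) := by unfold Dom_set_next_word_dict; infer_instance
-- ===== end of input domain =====

-- B replaces A's interleaved scan-and-dedup by two separate passes (collect all followers,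
-- then dedup each list); same return value, stated and proved below (objective: alternative).

-- ===== PORT A =====
-- one body of A's inner loop: the branch on 'word not in next_word_dict.keys()' and the
-- membership test 'story[i+1] not in next_word_dict[word]'
def pvStepA (d : PySem.Dict String (List String)) (word nxt : String) :
    PySem.Dict String (List String) :=
  if d.contains word = false then
    -- next_word_list=[]; next_word_list.append(story[i+1]); next_word_dict[word]=next_word_list
    let next_word_list : List String := []
    d.insert word (next_word_list ++ [nxt])
  else if (d.getD word []).contains nxt = false then
    -- next_word_dict[word].append(story[i+1])  (in-place mutation: modify keeps the key's position)
    d.modify word [] (· ++ [nxt])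
  else d

-- 'for i,word in enumerate(story): if i==len(story)-1: break; … story[i+1] …':
-- the loop runs exactly while a following word exists; word = current head, story[i+1] = next head
def pvLoopA : List String → PySem.Dict String (List String) → PySem.Dict String (List String)
  | word :: nxt :: rest, d => pvLoopA (nxt :: rest) (pvStepA d word nxt)
  | _, d => d

def set_next_word_dict (stories : List (List String)) : List (String × List String) :=
  (stories.foldl (fun d story => pvLoopA story d) PySem.Dict.empty).items

-- ===== PORT B =====
-- pass 1: for w, n in zip(story, story[1:]): follow.setdefault(w, []).append(n)
def pvFollowB (stories : List (List String)) : PySem.Dict String (List String) :=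
  stories.foldl
    (fun d story =>
      (story.zip (PySem.List.slice story (some 1) none)).foldl
        (fun d p => d.modify p.1 [] (· ++ [p.2])) d)
    PySem.Dict.empty

-- pass 2: {w: list(dict.fromkeys(ns)) for w, ns in follow.items()}  (dict.fromkeys = PySem.List.dedup)
def set_next_word_dict_alt (stories : List (List String)) : List (String × List String) :=
  (pvFollowB stories).items.map (fun p => (p.1, PySem.List.dedup p.2))

-- ===== PRECONDITION & SPEC =====
def Spec_set_next_word_dict (stories : List (List String)) (out : List (String × List String)) : Prop := out = set_next_word_dict_alt stories
instance (stories : List (List String)) (out : List (String × List String)) : Decidable (Spec_set_next_word_dict stories out) := by unfold Spec_set_next_word_dict; infer_instance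

-- ===== CLAIM (what is proved, stated in full; the proofs are below) =====
def Claim_equal_set_next_word_dict : Prop := ∀ (stories : List (List String)), Dom_set_next_word_dict stories → Spec_set_next_word_dict stories (set_next_word_dict stories)

-- ===== LEMMAS AND PROOFS =====

-- the invariant relating A's dict to B's pass-1 dict: same keys in the same order, and every
-- A-value is the ordered dedup of the corresponding B-value; B's keys stay Nodup
def pvInv (dA dB : PySem.Dict String (List String)) : Prop :=
  dA.items = dB.items.map (fun p => (p.1, PySem.List.dedup p.2)) ∧ dB.keys.Nodup

theorem pv_dedup_snoc (v : List String) (x : String) :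
    PySem.Set.ofList (v ++ [x]) =
      if x ∈ v then PySem.Set.ofList v else PySem.Set.ofList v ++ [x] := by
  have h1 : PySem.Set.ofList (v ++ [x]) = PySem.Set.add (PySem.Set.ofList v) x := by
    simp [PySem.Set.ofList, List.foldl_append]
  have hc : PySem.Set.contains (PySem.Set.ofList v) x = true ↔ x ∈ v := by
    simp [PySem.Set.contains, PySem.Set.mem_ofList]
  rw [h1, PySem.Set.add]
  by_cases h : x ∈ v
  · rw [if_pos (hc.mpr h), if_pos h]
  · rw [if_neg (fun hx => h (hc.mp hx)), if_neg h]

theorem pv_keys_eq {dA dB : PySem.Dict String (List String)}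
    (h : dA.items = dB.items.map (fun p => (p.1, PySem.List.dedup p.2))) :
    dA.keys = dB.keys := by
  simp only [PySem.Dict.keys, h, List.map_map]
  rfl

theorem pv_contains_eq {dA dB : PySem.Dict String (List String)}
    (h : dA.items = dB.items.map (fun p => (p.1, PySem.List.dedup p.2))) (w : String) :
    dA.contains w = dB.contains w := by
  rw [PySem.Dict.contains_eq_decide_mem_keys, PySem.Dict.contains_eq_decide_mem_keys,
    pv_keys_eq h]

theorem pv_getD_eq {dA dB : PySem.Dict String (List String)}
    (h : dA.items = dB.items.map (fun p => (p.1, PySem.List.dedup p.2)))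
    (hnd : dB.keys.Nodup) {w : String} (hc : dB.contains w = true) :
    dA.getD w [] = PySem.List.dedup (dB.getD w []) := by
  rw [PySem.Dict.contains_eq_decide_mem_keys] at hc
  have hw : w ∈ dB.keys := by simpa using hc
  simp only [PySem.Dict.keys, List.mem_map] at hw
  obtain ⟨p, hp, hp1⟩ := hw
  have hp' : (w, p.2) ∈ dB.items := by rw [← hp1]; simpa using hp
  have hB : dB.getD w [] = p.2 := PySem.Dict.getD_of_mem_items dB hp' hnd []
  have hA : (w, PySem.List.dedup p.2) ∈ dA.items := by
    rw [h]; exact List.mem_map.mpr ⟨p, hp, by simp [hp1]⟩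
  have hndA : dA.keys.Nodup := by rw [pv_keys_eq h]; exact hnd
  rw [hB]
  exact PySem.Dict.getD_of_mem_items dA hA hndA []

theorem pv_step (dA dB : PySem.Dict String (List String)) (w n : String)
    (h : pvInv dA dB) : pvInv (pvStepA dA w n) (dB.modify w [] (· ++ [n])) := by
  obtain ⟨hm, hnd⟩ := h
  have hc := pv_contains_eq hm w
  by_cases hw : dB.contains w = true
  · -- existing key: B appends in place; A appends only if n is new
    have hAc : dA.contains w = true := by rw [hc]; exact hw
    have hgetA : dA.getD w [] = PySem.List.dedup (dB.getD w []) := pv_getD_eq hm hnd hw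
    set v := dB.getD w [] with hv
    have hitemsB : (dB.modify w [] (· ++ [n])).items
        = dB.items.map (fun p => if p.1 == w then (w, v ++ [n]) else p) := by
      simp only [PySem.Dict.modify]
      exact PySem.Dict.items_insert_of_contains dB _ hw
    have hkeyval : ∀ p ∈ dB.items, p.1 = w → p.2 = v := by
      intro p hp hp1
      have := PySem.Dict.getD_of_mem_items dB (k := p.1) (v := p.2) hp hnd []
      rw [hp1] at this; rw [← this, hv]
    constructor
    · by_cases hn : n ∈ v
      · -- duplicate follower: A leaves its dict unchanged; dedup (v ++ [n]) = dedup v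
        have hmemA : n ∈ dA.getD w [] := by
          rw [hgetA]
          simpa [PySem.List.dedup, PySem.Set.mem_ofList] using hn
        have hstep : pvStepA dA w n = dA := by simp [pvStepA, hAc, hmemA]
        rw [hstep, hm, hitemsB, List.map_map]
        refine (List.map_congr_left ?_).symm
        intro p hp
        by_cases hp1 : p.1 = w
        · have hp2 := hkeyval p hp hp1
          simp [hp1, hp2, Function.comp, pv_dedup_snoc, hn]
        · simp [Function.comp, beq_iff_eq, hp1]
      · -- new follower: A appends to its (deduped) list
        have hmemA : n ∉ dA.getD w [] := by
          rw [hgetA]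
          simpa [PySem.List.dedup, PySem.Set.mem_ofList] using hn
        have hstep : pvStepA dA w n = dA.modify w [] (· ++ [n]) := by
          simp [pvStepA, hAc, hmemA]
        have hitemsA : (dA.modify w [] (· ++ [n])).items
            = dA.items.map (fun p => if p.1 == w then (w, PySem.List.dedup v ++ [n]) else p) := by
          simp only [PySem.Dict.modify, hgetA]
          exact PySem.Dict.items_insert_of_contains dA _ hAc
        rw [hstep, hitemsA, hm, List.map_map, hitemsB, List.map_map]
        refine List.map_congr_left ?_
        intro p hp
        by_cases hp1 : p.1 = w
        · have hp2 := hkeyval p hp hp1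
          simp [hp1, Function.comp, pv_dedup_snoc, hn]
        · simp [Function.comp, beq_iff_eq, hp1]
    · -- keys are unchanged by an overwrite
      have : (dB.modify w [] (· ++ [n])).keys = dB.keys := by
        rw [PySem.Dict.keys_modify]
        exact PySem.Dict.keys_insert_of_contains dB _ hw
      rw [this]; exact hnd
  · -- fresh key: both sides append a new entry at the end
    have hw' : dB.contains w = false := by simpa using hw
    have hAc : dA.contains w = false := by rw [hc]; exact hw'
    have hgB : dB.getD w [] = [] := PySem.Dict.getD_of_not_contains dB [] hw' 
    have hitemsB : (dB.modify w [] (· ++ [n])).items = dB.items ++ [(w, [n])] := by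
      simp only [PySem.Dict.modify, hgB, List.nil_append]
      exact PySem.Dict.items_insert_of_not_contains dB _ hw'
    constructor
    · have hstep : pvStepA dA w n = dA.insert w ([] ++ [n]) := by simp [pvStepA, hAc]
      have hitemsA : (dA.insert w ([] ++ [n])).items = dA.items ++ [(w, [n])] := by
        simpa using PySem.Dict.items_insert_of_not_contains dA ([] ++ [n]) hAc
      rw [hstep, hitemsA, hm, hitemsB, List.map_append]
      simp [PySem.List.dedup, PySem.Set.ofList, PySem.Set.add, PySem.Set.empty]
    · have : (dB.modify w [] (· ++ [n])).keys = dB.keys ++ [w] := by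
        simp [PySem.Dict.keys, hitemsB]
      rw [this]
      refine List.nodup_append.mpr ⟨hnd, List.nodup_singleton w, ?_⟩
      intro a ha
      have : a ∈ dB.keys → a ≠ w := by
        intro _ hEq
        subst hEq
        rw [PySem.Dict.contains_eq_decide_mem_keys] at hw'
        simp_all
      simpa using this ha

theorem pv_loop (story : List String) :
    ∀ dA dB, pvInv dA dB →
      pvInv (pvLoopA story dA)
        ((story.zip (PySem.List.slice story (some 1) none)).foldl
          (fun d p => d.modify p.1 [] (· ++ [p.2])) dB) := by
  induction story with
  | nil => intro dA dB h; simpa [pvLoopA, PySem.List.slice] using h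
  | cons w t ih =>
    intro dA dB h
    cases t with
    | nil =>
      simpa [pvLoopA, PySem.List.slice_from_one] using h
    | cons n rest =>
      have hz : PySem.List.slice (w :: n :: rest) (some 1) none = n :: rest :=
        PySem.List.slice_from_one _
      have hz' : PySem.List.slice (n :: rest) (some 1) none = rest :=
        PySem.List.slice_from_one _
      rw [hz]
      show pvInv (pvLoopA (n :: rest) (pvStepA dA w n)) _
      have := ih (pvStepA dA w n) (dB.modify w [] (· ++ [n])) (pv_step dA dB w n h)
      rw [hz'] at this
      simp [List.zip] at this ⊢
      exact this

theorem pv_outer (stories : List (List String)) :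
    ∀ dA dB, pvInv dA dB →
      pvInv (stories.foldl (fun d story => pvLoopA story d) dA)
        (stories.foldl
          (fun d story =>
            (story.zip (PySem.List.slice story (some 1) none)).foldl
              (fun d p => d.modify p.1 [] (· ++ [p.2])) d) dB) := by
  induction stories with
  | nil => intro dA dB h; simpa using h
  | cons s rest ih =>
    intro dA dB h
    exact ih _ _ (pv_loop s dA dB h)

-- ===== VERDICT (by name: the statement is the Claim_ definition above) =====
theorem set_next_word_dict_spec : Claim_equal_set_next_word_dict := by
  intro stories _
  unfold Spec_set_next_word_dict set_next_word_dict set_next_word_dict_alt pvFollowB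
  have h0 : pvInv PySem.Dict.empty PySem.Dict.empty := by
    constructor
    · simp [PySem.Dict.empty]
    · simp [PySem.Dict.keys, PySem.Dict.empty]
  exact (pv_outer stories PySem.Dict.empty PySem.Dict.empty h0).1
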